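-- pv_equiv track=rewrite | github.com/rdemaria/pyoptics | pyoptics/pymad.py | parse_attr
-- ===== SOURCE A (Python) =====
-- def parse_attr(attr):
--     ch = False
--     out = []
--     if attr:
--         for i in attr:
--             if i == "{":
--                 ch = True
--             if i == "}":
--                 ch = False
--             if ch and (i == ","):
--                 out.append(" ")
--             else:
--                 out.append(i)
--     return out and ("".join(out[1:])).split(",") or out
-- ===== SOURCE B (Python) =====
-- def parse_attr(attr):
--     # One pass building the tokens directly (A builds a char list, joins and re-splits).
--     # Note: like A, the first character is consumed only for the brace flag and never output.
--     if not attr: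
--         return []
--     ch = attr[0] == "{"
--     done = []
--     cur = ""
--     for c in attr[1:]:
--         if c == "{":
--             ch = True
--             cur += c
--         elif c == "}":
--             ch = False
--             cur += c
--         elif c == ",":
--             if ch:
--                 cur += " "
--             else:
--                 done.append(cur)
--                 cur = ""
--         else:
--             cur += c
--     done.append(cur)
--     return done
-- ===== Notes on version B (the rewrite author's own statement) =====
-- stated objective: alternative
-- what changed: B tokenizes in a single pass, maintaining the brace flag and appending to the current token or starting a new one on an unprotected comma, instead of A's build-a-char-list then join-and-split-on-comma pipeline.
import Mathlib
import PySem

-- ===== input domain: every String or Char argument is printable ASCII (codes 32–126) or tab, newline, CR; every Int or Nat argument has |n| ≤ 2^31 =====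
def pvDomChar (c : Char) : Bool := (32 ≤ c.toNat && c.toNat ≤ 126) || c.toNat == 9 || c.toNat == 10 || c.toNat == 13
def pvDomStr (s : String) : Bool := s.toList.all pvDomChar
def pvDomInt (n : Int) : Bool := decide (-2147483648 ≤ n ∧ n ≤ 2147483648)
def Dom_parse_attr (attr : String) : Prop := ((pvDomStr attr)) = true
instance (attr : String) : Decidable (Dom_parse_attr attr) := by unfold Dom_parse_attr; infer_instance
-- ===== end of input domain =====

-- B builds the comma-separated tokens directly in one pass instead of building a
-- character list, joining it and re-splitting on "," (alternative decomposition, same cost).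


-- ===== PORT A =====
-- loop body of A: update the flag on '{'/'}', append ' ' for a protected comma, else the char
def pvStepA (st : Bool × List Char) (i : Char) : Bool × List Char :=
  let ch := if i = '{' then true else st.1
  let ch := if i = '}' then false else ch
  (ch, if ch && (i == ',') then st.2 ++ [' '] else st.2 ++ [i])

def parse_attr (attr : String) : List String :=
  let st := attr.toList.foldl pvStepA (false, ([] : List Char))
  -- `out and "".join(out[1:]).split(",") or out`: out is empty iff attr is empty
  if st.2 = [] then []
  else (PySem.Chars.splitOn (st.2.drop 1) [',']).map String.mk

-- ===== PORT B =====
-- loop body of B: state = (flag, finished tokens, current token)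
def pvStepB (st : Bool × List (List Char) × List Char) (c : Char) : Bool × List (List Char) × List Char :=
  if c = '{' then (true, st.2.1, st.2.2 ++ [c])
  else if c = '}' then (false, st.2.1, st.2.2 ++ [c])
  else if c = ',' then
    (if st.1 then (st.1, st.2.1, st.2.2 ++ [' ']) else (st.1, st.2.1 ++ [st.2.2], []))
  else (st.1, st.2.1, st.2.2 ++ [c])

def parse_attr_alt (attr : String) : List String :=
  match attr.toList with
  | [] => []
  | c0 :: rest =>
    let st := rest.foldl pvStepB (c0 = '{', [], ([] : List Char))
    (st.2.1 ++ [st.2.2]).map String.mk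

-- ===== PRECONDITION & SPEC =====
def Spec_parse_attr (attr : String) (out : List String) : Prop := out = parse_attr_alt attr
instance (attr : String) (out : List String) : Decidable (Spec_parse_attr attr out) := by unfold Spec_parse_attr; infer_instance

-- ===== CLAIM (what is proved, stated in full; the proofs are below) =====
def Claim_equal_parse_attr : Prop := ∀ (attr : String), Dom_parse_attr attr → Spec_parse_attr attr (parse_attr attr)

-- ===== LEMMAS AND PROOFS =====

-- recursive form of A's character output, flag threaded through
def pvOutA (ch : Bool) : List Char → List Char
  | [] => []
  | c :: cs =>
    let ch' := if c = '{' then true else if c = '}' then false else ch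
    (if ch' && (c == ',') then ' ' else c) :: pvOutA ch' cs

-- prepend a char to the head token (if any)
def pvMH (f : List Char → List Char) : List (List Char) → List (List Char)
  | [] => []
  | t :: ts => f t :: ts

-- simple recursion computing split-on-',' of a char list
def pvSrec : List Char → List (List Char)
  | [] => [[]]
  | c :: cs => if c = ',' then [] :: pvSrec cs else pvMH (c :: ·) (pvSrec cs)

-- recursive form of B's token list, current token prepended into the head
def pvTokB (ch : Bool) : List Char → List (List Char)
  | [] => [[]]
  | c :: cs =>
    if c = '{' then pvMH (c :: ·) (pvTokB true cs)
    else if c = '}' then pvMH (c :: ·) (pvTokB false cs)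
    else if c = ',' then (if ch then pvMH (' ' :: ·) (pvTokB ch cs) else [] :: pvTokB ch cs)
    else pvMH (c :: ·) (pvTokB ch cs)

theorem pvFoldA (cs : List Char) : ∀ (ch : Bool) (out : List Char),
    (cs.foldl pvStepA (ch, out)).2 = out ++ pvOutA ch cs := by
  induction cs with
  | nil => intro ch out; simp [pvOutA]
  | cons c cs ih =>
    intro ch out
    by_cases h1 : c = '{' <;> by_cases h2 : c = '}' <;> cases ch <;> by_cases h3 : c = ',' <;>
      simp_all [pvStepA, pvOutA, List.foldl_cons]

theorem pvFoldB (cs : List Char) : ∀ (ch : Bool) (done : List (List Char)) (cur : List Char),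
    (let st := cs.foldl pvStepB (ch, done, cur)
     st.2.1 ++ [st.2.2]) = done ++ pvMH (cur ++ ·) (pvTokB ch cs) := by
  induction cs with
  | nil => intro ch done cur; simp [pvTokB, pvMH]
  | cons c cs ih =>
    intro ch done cur
    by_cases h1 : c = '{'
    · simp only [pvStepB, pvTokB, if_pos h1, List.foldl_cons, ih]
      cases pvTokB true cs <;> simp [pvMH]
    · by_cases h2 : c = '}'
      · simp only [pvStepB, pvTokB, if_neg h1, if_pos h2, List.foldl_cons, ih]
        cases pvTokB false cs <;> simp [pvMH]
      · by_cases h3 : c = ','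
        · cases hch : ch <;>
            simp only [pvStepB, pvTokB, if_neg h1, if_neg h2, if_pos h3, List.foldl_cons, ih,
              Bool.false_eq_true, if_false, if_true]
          · cases pvTokB false cs <;> simp [pvMH]
          · cases pvTokB true cs <;> simp [pvMH]
        · simp only [pvStepB, pvTokB, if_neg h1, if_neg h2, if_neg h3, List.foldl_cons, ih]
          cases pvTokB ch cs <;> simp [pvMH]

-- splitOn.go with enough fuel, characterised by pvSrec
theorem pvGo (fuel : Nat) : ∀ (l : List Char) (cur : List Char) (acc : List (List Char)),
    l.length + 1 ≤ fuel →
    PySem.Chars.splitOn.go [','] fuel l cur acc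
      = acc.reverse ++ pvMH (cur.reverse ++ ·) (pvSrec l) := by
  induction fuel with
  | zero => intro l cur acc h; omega
  | succ f ih =>
    intro l cur acc h
    cases l with
    | nil => simp [PySem.Chars.splitOn.go, pvSrec, pvMH]
    | cons c rest =>
      by_cases hc : c = ','
      · subst hc
        have : ([','].isPrefixOf (',' :: rest)) = true := by simp [List.isPrefixOf]
        simp only [PySem.Chars.splitOn.go, this, if_pos]
        rw [show List.drop [','].length (',' :: rest) = rest from rfl]
        rw [ih rest [] ((cur.reverse) :: acc) (by simp at h ⊢; omega)]
        cases hr : pvSrec rest <;> simp [pvSrec, pvMH, hr]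
      · have : ([','].isPrefixOf (c :: rest)) = false := by
          simp [List.isPrefixOf]; exact fun h' => hc h'.symm
        simp only [PySem.Chars.splitOn.go, this, Bool.false_eq_true, if_false]
        rw [ih rest (c :: cur) acc (by simp at h ⊢; omega)]
        simp only [pvSrec, if_neg hc]
        cases pvSrec rest <;> simp [pvMH]

theorem pvSplitOn_eq (l : List Char) : PySem.Chars.splitOn l [','] = pvSrec l := by
  have := pvGo (l.length + 1) l [] [] (le_refl _)
  simp only [PySem.Chars.splitOn, this, List.reverse_nil, List.nil_append]
  cases pvSrec l <;> simp [pvMH]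

-- core: splitting A's character output gives B's token list
theorem pvCore (cs : List Char) : ∀ (ch : Bool), pvSrec (pvOutA ch cs) = pvTokB ch cs := by
  induction cs with
  | nil => intro ch; rfl
  | cons c cs ih =>
    intro ch
    by_cases h1 : c = '{'
    · subst h1; simp [pvOutA, pvTokB, pvSrec, ih]
    · by_cases h2 : c = '}'
      · subst h2; simp [pvOutA, pvTokB, pvSrec, ih]
      · by_cases h3 : c = ','
        · subst h3
          cases ch <;> simp [pvOutA, pvTokB, pvSrec, ih]
        · simp [pvOutA, pvTokB, pvSrec, h1, h2, h3, ih]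

theorem pvOutA_cons (c : Char) (cs : List Char) :
    pvOutA false (c :: cs)
      = (if (c = '{' : Bool) && (c == ',') then ' ' else c) :: pvOutA (c = '{') cs := by
  by_cases h1 : c = '{' <;> by_cases h2 : c = '}' <;> simp_all [pvOutA]

-- ===== VERDICT (by name: the statement is the Claim_ definition above) =====
theorem parse_attr_spec : Claim_equal_parse_attr := by
  intro attr _
  unfold Spec_parse_attr parse_attr parse_attr_alt
  cases hl : attr.toList with
  | nil => simp
  | cons c0 rest =>
    have hA := pvFoldA (c0 :: rest) false []
    have hB := pvFoldB rest (decide (c0 = '{')) [] []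
    simp only [hA, List.nil_append, pvOutA_cons]
    have hne : ((if (decide (c0 = '{')) && (c0 == ',') then ' ' else c0) :: pvOutA (decide (c0 = '{')) rest) ≠ [] := by
      simp
    rw [if_neg hne]
    simp only [List.drop_one, List.tail_cons, pvSplitOn_eq, pvCore]
    rw [hB]
    cases pvTokB (decide (c0 = '{')) rest <;> simp [pvMH]
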